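-- pv_equiv track=rewrite | github.com/denzi-gh/crashwoc-decomp | tools/add_split_from_backup.py | remove_unit
-- ===== SOURCE A (Python) =====
-- from typing import Dict, List, Tuple
--
-- def remove_unit(lines: List[str], unit_name: str) -> List[str]:
--     out: List[str] = []
--     i = 0
--     target = f"{unit_name}:"
--     while i < len(lines):
--         if lines[i] == target:
--             i += 1
--             while i < len(lines) and lines[i].startswith("\t"):
--                 i += 1
--             while i < len(lines) and lines[i].strip() == "":
--                 i += 1
--             continue
--         out.append(lines[i])
--         i += 1
--     return out
-- ===== SOURCE B (Python) =====
-- def remove_unit(lines, unit_name):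
--     target = unit_name + ":"
--     out = []
--     state = "NORMAL"
--     for line in lines:
--         if state == "SKIP_TABS":
--             if line.startswith("\t"):
--                 continue
--             state = "SKIP_BLANKS"
--         if state == "SKIP_BLANKS":
--             if line.strip() == "":
--                 continue
--             state = "NORMAL"
--         if line == target:
--             state = "SKIP_TABS"
--         else:
--             out.append(line)
--     return out
-- ===== Notes on version B (the rewrite author's own statement) =====
-- stated objective: simpler
-- what changed: Replaced A's index-driven outer while with two nested inner skip-loops by a single flat pass over the lines that keeps a three-valued state flag (NORMAL/SKIP_TABS/SKIP_BLANKS) and falls through between states on boundary lines.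
import Mathlib
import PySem

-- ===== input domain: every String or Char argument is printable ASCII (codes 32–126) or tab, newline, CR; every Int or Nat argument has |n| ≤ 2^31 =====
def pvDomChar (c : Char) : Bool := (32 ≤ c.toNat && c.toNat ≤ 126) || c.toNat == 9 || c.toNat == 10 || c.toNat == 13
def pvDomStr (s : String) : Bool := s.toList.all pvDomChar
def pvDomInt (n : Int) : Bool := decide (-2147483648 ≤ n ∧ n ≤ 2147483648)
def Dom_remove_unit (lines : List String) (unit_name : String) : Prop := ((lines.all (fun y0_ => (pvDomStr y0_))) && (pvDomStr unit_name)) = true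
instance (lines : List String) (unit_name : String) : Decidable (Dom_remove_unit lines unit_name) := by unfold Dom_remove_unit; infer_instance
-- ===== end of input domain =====

-- B replaces A's index-driven outer while with nested inner skip loops by a single flat
-- pass maintaining a state flag (NORMAL / SKIP_TABS / SKIP_BLANKS); objective: simpler.

-- ===== PORT A =====
-- A's two inner 'while' loops advance i past tab-lines then past blank lines: ported as
-- List.dropWhile on the remaining suffix; the outer while over i becomes recursion on the suffix.
def removeUnitLoopA (target : String) : List String → List String
  | [] => []
  | l :: rest =>
    if l == target then
      removeUnitLoopA target
        ((rest.dropWhile (fun x => PySem.Str.startswith x "\t")).dropWhile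
          (fun x => PySem.Str.strip x == ""))
    else
      l :: removeUnitLoopA target rest
termination_by l => l.length
decreasing_by
  · have h1 := List.length_dropWhile_le (fun x => PySem.Str.strip x == "")
      (rest.dropWhile (fun x => PySem.Str.startswith x "\t"))
    have h2 := List.length_dropWhile_le (fun x => PySem.Str.startswith x "\t") rest
    simp only [List.length_cons]
    omega
  · simp

def remove_unit (lines : List String) (unit_name : String) : List String :=
  removeUnitLoopA (unit_name ++ ":") lines

-- ===== PORT B =====
-- states: 0 = NORMAL, 1 = SKIP_TABS, 2 = SKIP_BLANKS
def removeUnitStepB (target : String) (acc : Nat × List String) (line : String) : Nat × List String :=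
  if acc.1 == 1 && PySem.Str.startswith line "\t" then (1, acc.2)
  else
    let st := if acc.1 == 1 then 2 else acc.1
    if st == 2 && PySem.Str.strip line == "" then (2, acc.2)
    else if line == target then (1, acc.2)
    else (0, acc.2 ++ [line])

def remove_unit_alt (lines : List String) (unit_name : String) : List String :=
  (lines.foldl (removeUnitStepB (unit_name ++ ":")) (0, [])).2

-- ===== PRECONDITION & SPEC =====
def Spec_remove_unit (lines : List String) (unit_name : String) (out : List String) : Prop := out = remove_unit_alt lines unit_name
instance (lines : List String) (unit_name : String) (out : List String) : Decidable (Spec_remove_unit lines unit_name out) := by unfold Spec_remove_unit; infer_instance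

-- ===== CLAIM (what is proved, stated in full; the proofs are below) =====
def Claim_equal_remove_unit : Prop := ∀ (lines : List String) (unit_name : String), Dom_remove_unit lines unit_name → Spec_remove_unit lines unit_name (remove_unit lines unit_name)

-- ===== LEMMAS AND PROOFS =====

-- Shape of B's step function at each literal state value.
-- conditional unfoldings of A's well-founded loop
theorem loopA_cons_pos (target a : String) (rest : List String) (h : (a == target) = true) :
    removeUnitLoopA target (a :: rest) =
      removeUnitLoopA target
        ((rest.dropWhile (fun x => PySem.Str.startswith x "\t")).dropWhile
          (fun x => PySem.Str.strip x == "")) := by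
  rw [removeUnitLoopA.eq_def]; simp [h]

theorem loopA_cons_neg (target a : String) (rest : List String) (h : ¬ (a == target) = true) :
    removeUnitLoopA target (a :: rest) = a :: removeUnitLoopA target rest := by
  rw [removeUnitLoopA.eq_def]; simp [h]

theorem stepB_0 (target line : String) (out : List String) :
    removeUnitStepB target (0, out) line =
      if line == target then (1, out) else (0, out ++ [line]) := by
  simp [removeUnitStepB]

theorem stepB_1 (target line : String) (out : List String) :
    removeUnitStepB target (1, out) line =
      if PySem.Str.startswith line "\t" then (1, out)
      else if PySem.Str.strip line == "" then (2, out)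
      else if line == target then (1, out) else (0, out ++ [line]) := by
  simp [removeUnitStepB]

theorem stepB_2 (target line : String) (out : List String) :
    removeUnitStepB target (2, out) line =
      if PySem.Str.strip line == "" then (2, out)
      else if line == target then (1, out) else (0, out ++ [line]) := by
  simp [removeUnitStepB]

-- Invariant: running B's fold from each of the three states computes A's loop on the
-- corresponding (possibly skipped) suffix, appended to the accumulator.
theorem foldB_states (target : String) (l : List String) :
    ∀ out : List String,
      ((l.foldl (removeUnitStepB target) (0, out)).2 = out ++ removeUnitLoopA target l)
      ∧ ((l.foldl (removeUnitStepB target) (1, out)).2 =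
          out ++ removeUnitLoopA target
            ((l.dropWhile (fun x => PySem.Str.startswith x "\t")).dropWhile
              (fun x => PySem.Str.strip x == "")))
      ∧ ((l.foldl (removeUnitStepB target) (2, out)).2 =
          out ++ removeUnitLoopA target (l.dropWhile (fun x => PySem.Str.strip x == ""))) := by
  induction l with
  | nil => intro out; simp [removeUnitLoopA]
  | cons a rest ih =>
    intro out
    have h2 : ((a :: rest).foldl (removeUnitStepB target) (2, out)).2 =
        out ++ removeUnitLoopA target
          ((a :: rest).dropWhile (fun x => PySem.Str.strip x == "")) := by
      by_cases hb : PySem.Str.strip a = ""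
      · simpa [List.foldl_cons, stepB_2, List.dropWhile_cons, hb] using (ih out).2.2
      · have hd : (a :: rest).dropWhile (fun x => PySem.Str.strip x == "") = a :: rest := by
          simp [hb]
        by_cases ht : a = target
        · have hb' : ¬ PySem.Str.strip target = "" := by rw [← ht]; exact hb
          rw [hd, loopA_cons_pos target a rest (beq_iff_eq.mpr ht)]
          simpa [List.foldl_cons, stepB_2, hb, hb', ht] using (ih out).2.1
        · rw [hd, loopA_cons_neg target a rest (by simp [ht])]
          simpa [List.foldl_cons, stepB_2, hb, ht] using (ih (out ++ [a])).1
    have h1 : ((a :: rest).foldl (removeUnitStepB target) (1, out)).2 =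
        out ++ removeUnitLoopA target
          (((a :: rest).dropWhile (fun x => PySem.Str.startswith x "\t")).dropWhile
            (fun x => PySem.Str.strip x == "")) := by
      by_cases htab : PySem.Chars.startswith a.toList ['\t'] = true
      · simpa [List.foldl_cons, stepB_1, List.dropWhile_cons, PySem.Str.startswith, htab]
          using (ih out).2.1
      · have hd : (a :: rest).dropWhile (fun x => PySem.Str.startswith x "\t") = a :: rest := by
          simp [PySem.Str.startswith, htab]
        rw [hd, ← h2]
        simp [List.foldl_cons, stepB_1, stepB_2, PySem.Str.startswith, htab]
    have h0 : ((a :: rest).foldl (removeUnitStepB target) (0, out)).2 =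
        out ++ removeUnitLoopA target (a :: rest) := by
      by_cases ht : a = target
      · rw [loopA_cons_pos target a rest (beq_iff_eq.mpr ht)]
        simpa [List.foldl_cons, stepB_0, ht] using (ih out).2.1
      · rw [loopA_cons_neg target a rest (by simp [ht])]
        simpa [List.foldl_cons, stepB_0, ht] using (ih (out ++ [a])).1
    exact ⟨h0, h1, h2⟩

-- ===== VERDICT (by name: the statement is the Claim_ definition above) =====
theorem remove_unit_spec : Claim_equal_remove_unit := by
  intro lines unit_name _
  unfold Spec_remove_unit remove_unit remove_unit_alt
  exact ((foldB_states (unit_name ++ ":") lines []).1).symm
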